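-- pv_equiv track=rewrite | github.com/kiipo0623/Algorithm-2022 | 0610/1038.py | check
-- ===== SOURCE A (Python) =====
-- def check(num):
--     num = str(num)
--     L = len(num)
--     for i in range(L-1):
--         if num[i] > num[i+1]:
--             continue
--         else:
--             return False
--     return True
-- ===== SOURCE B (Python) =====
-- def check(num):
--     s = str(num)
--     return len(set(s)) == len(s) and list(s) == sorted(s, reverse=True)
-- ===== Notes on version B (the rewrite author's own statement) =====
-- stated objective: alternative
-- what changed: Replaces the index loop over adjacent character pairs by a sort-and-compare with a set-cardinality distinctness guard: s is strictly decreasing iff it equals its descending sort and has no duplicate characters.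
import Mathlib
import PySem

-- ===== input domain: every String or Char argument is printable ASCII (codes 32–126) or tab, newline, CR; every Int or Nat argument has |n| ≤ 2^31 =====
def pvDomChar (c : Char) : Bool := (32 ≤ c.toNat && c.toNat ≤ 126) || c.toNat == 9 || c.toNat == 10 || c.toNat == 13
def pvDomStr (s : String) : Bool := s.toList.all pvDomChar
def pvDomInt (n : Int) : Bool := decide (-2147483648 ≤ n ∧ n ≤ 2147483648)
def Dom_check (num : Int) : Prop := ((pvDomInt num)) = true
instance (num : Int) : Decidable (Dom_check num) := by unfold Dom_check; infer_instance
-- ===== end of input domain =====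

-- B replaces A's adjacent-pair index loop by sort-and-compare plus a set-cardinality
-- distinctness guard (alternative decomposition, not claimed faster).


-- ===== PORT A =====
-- the 'for i in range(L-1)' loop with early 'return False'; num[i] > num[i+1]
-- on one-char strings is the code-point comparison b < a on chars (exact)
def checkGo (cs : List Char) : List Int → Bool
  | [] => true
  | i :: rest =>
    match PySem.List.pyGet? cs i, PySem.List.pyGet? cs (i + 1) with
    | some a, some b => if b < a then checkGo cs rest else false
    | _, _ => false

def check (num : Int) : Bool :=
  let s := (PySem.Int.toStr num).toList
  let L : Int := s.length
  checkGo s (PySem.List.pyRange 0 (L - 1) 1)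

-- ===== PORT B =====
def check_alt (num : Int) : Bool :=
  let s := (PySem.Int.toStr num).toList
  decide ((PySem.Set.ofList s).length = s.length) &&
    decide (s = PySem.List.sorted s (fun c => c) true)

-- ===== PRECONDITION & SPEC =====
def Spec_check (num : Int) (out : Bool) : Prop := out = check_alt num
instance (num : Int) (out : Bool) : Decidable (Spec_check num out) := by unfold Spec_check; infer_instance

-- ===== CLAIM (what is proved, stated in full; the proofs are below) =====
def Claim_equal_check : Prop := ∀ (num : Int), Dom_check num → Spec_check num (check num)

-- ===== LEMMAS AND PROOFS =====

-- proof-only helper: strict adjacent decrease, structurally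
def pairsDec : List Char → Bool
  | [] => true
  | [_] => true
  | a :: b :: t => (decide (b < a)) && pairsDec (b :: t)

lemma pairsDec_iff (cs : List Char) :
    pairsDec cs = true ↔ cs.Pairwise (fun a b => b < a) := by
  match cs with
  | [] => simp [pairsDec]
  | [a] => simp [pairsDec]
  | a :: b :: u =>
    have ih := pairsDec_iff (b :: u)
    simp only [pairsDec, Bool.and_eq_true, decide_eq_true_iff, ih]
    constructor
    · rintro ⟨hab, hp⟩
      refine List.Pairwise.cons ?_ hp
      intro x hx
      rcases List.mem_cons.mp hx with rfl | hx
      · exact hab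
      · exact lt_trans (List.rel_of_pairwise_cons hp hx) hab
    · intro hp
      exact ⟨List.rel_of_pairwise_cons hp (List.mem_cons_self ..),
        hp.sublist (List.sublist_cons_self ..)⟩

lemma ofList_sublist {α : Type} [BEq α] (xs : List α) :
    (PySem.Set.ofList xs).Sublist xs := by
  have key : ∀ (xs : List α) (s : List α), ∃ t, t.Sublist xs ∧
      xs.foldl PySem.Set.add s = s ++ t := by
    intro xs
    induction xs with
    | nil => intro s; exact ⟨[], List.Sublist.refl _, by simp⟩
    | cons x xs ih =>
      intro s
      by_cases h : PySem.Set.contains s x = true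
      · obtain ⟨t, ht, he⟩ := ih s
        refine ⟨t, ht.cons _, ?_⟩
        simp only [List.foldl_cons, PySem.Set.add, if_pos h]
        exact he
      · obtain ⟨t, ht, he⟩ := ih (s ++ [x])
        refine ⟨x :: t, ht.cons₂ _, ?_⟩
        simp only [List.foldl_cons, PySem.Set.add, if_neg h]
        rw [he, List.append_assoc]; rfl
  obtain ⟨t, ht, he⟩ := key xs []
  simpa [PySem.Set.ofList_eq_foldl, he] using ht

lemma lenEq_iff_nodup (cs : List Char) :
    (PySem.Set.ofList cs).length = cs.length ↔ cs.Nodup := by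
  constructor
  · intro h
    have := (ofList_sublist cs).eq_of_length h
    rw [← this]; exact PySem.Set.nodup_ofList cs
  · intro h
    rw [PySem.Set.ofList_eq_self_of_nodup cs h]

lemma loopA (cs : List Char) (k : Nat) :
    checkGo cs (PySem.List.pyRange (k : Int) ((cs.length : Int) - 1) 1) =
      pairsDec (cs.drop k) := by
  by_cases hk : k + 1 < cs.length
  · have hlt : (k : Int) < (cs.length : Int) - 1 := by omega
    rw [PySem.List.pyRange_one_cons hlt]
    have h1 : PySem.List.pyGet? cs (k : Int) = some cs[k] := by
      rw [PySem.List.pyGet?_natCast]; exact List.getElem?_eq_getElem (by omega)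
    have h2 : PySem.List.pyGet? cs ((k : Int) + 1) = some cs[k + 1] := by
      have : (k : Int) + 1 = ((k + 1 : Nat) : Int) := by push_cast; ring
      rw [this, PySem.List.pyGet?_natCast]
      exact List.getElem?_eq_getElem hk
    have hd1 : cs.drop k = cs[k] :: cs.drop (k + 1) :=
      List.drop_eq_getElem_cons (by omega)
    have hd2 : cs.drop (k + 1) = cs[k + 1] :: cs.drop (k + 2) :=
      List.drop_eq_getElem_cons hk
    have ih := loopA cs (k + 1)
    rw [hd1, hd2] at *
    simp only [checkGo, h1, h2, pairsDec]
    rw [show ((k : Int) + 1) = ((k + 1 : Nat) : Int) by push_cast; ring, ih, hd2]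
    by_cases hc : cs[k + 1] < cs[k] <;> simp [hc]
  · have hr : PySem.List.pyRange (k : Int) ((cs.length : Int) - 1) 1 = [] := by
      exact PySem.List.pyRange_one_eq_nil (by omega)
    rw [hr]
    have : cs.drop k = [] ∨ ∃ a, cs.drop k = [a] := by
      rcases h : cs.drop k with _ | ⟨a, t⟩
      · exact Or.inl rfl
      · right
        have hlen : (cs.drop k).length = cs.length - k := List.length_drop ..
        rw [h] at hlen
        have : t = [] := by
          cases t
          · rfl
          · simp at hlen; omega
        exact ⟨a, by rw [this]⟩
    rcases this with h | ⟨a, h⟩ <;> simp [h, checkGo, pairsDec]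
termination_by cs.length - k

lemma listLevel (cs : List Char) :
    pairsDec cs =
      (decide ((PySem.Set.ofList cs).length = cs.length) &&
        decide (cs = PySem.List.sorted cs (fun c => c) true)) := by
  rw [Bool.eq_iff_iff, pairsDec_iff, Bool.and_eq_true, decide_eq_true_iff,
    decide_eq_true_iff, lenEq_iff_nodup]
  constructor
  · intro hgt
    have hnd : cs.Nodup := hgt.imp (fun hlt => (ne_of_lt hlt).symm)
    exact ⟨hnd, (PySem.List.sorted_rev_eq_self_of_pairwise cs (fun c => c)
      (hgt.imp le_of_lt)).symm⟩
  · rintro ⟨hnd, hsort⟩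
    have hge : cs.Pairwise (fun a b => b ≤ a) := by
      have := PySem.List.sorted_pairwise_rev cs (fun c => c)
      rwa [← hsort] at this
    exact (List.Pairwise.and hge hnd).imp
      (fun ⟨hle, hne⟩ => lt_of_le_of_ne hle (Ne.symm hne))

-- ===== VERDICT (by name: the statement is the Claim_ definition above) =====
theorem check_spec : Claim_equal_check := by
  intro num _
  unfold Spec_check check check_alt
  have := loopA ((PySem.Int.toStr num).toList) 0
  simp only [Nat.cast_zero, List.drop_zero] at this
  rw [this, listLevel]
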